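-- pv_equiv track=rewrite | github.com/Mathis-Dory/master-thesis | RL/utils.py | distribute_parentheses
-- ===== SOURCE A (Python) =====
-- def extract_valid_parenthesis_positions(flat_tokens):
--     """
--     Determine valid positions for parentheses insertion between flattened tokens.
--
--     :param flat_tokens: List of flattened tokens.
--     :return: A list of valid positions for parentheses insertion.
--     """
--     valid_positions = [0]  # Start of the payload
--     for i in range(1, len(flat_tokens)):
--         valid_positions.append(i)
--     valid_positions.append(len(flat_tokens))  # End of the payload
--     return valid_positions
--
-- def distribute_parentheses(flat_tokens, parentheses_count):
--     """
--     Distribute closing parentheses across valid positions within the payload.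
--
--     :param flat_tokens: List of flattened tokens.
--     :param parentheses_count: Number of closing parentheses to insert.
--     :return: Tokens with parentheses distributed appropriately.
--     """
--     valid_positions = extract_valid_parenthesis_positions(flat_tokens)
--
--     # Ensure parentheses are distributed
--     for _ in range(parentheses_count):
--         if not valid_positions:
--             break
--         # Pick a random valid position to distribute parentheses
--         insert_pos = valid_positions.pop(0)  # Pop from the front for simplicity
--         flat_tokens.insert(insert_pos, ")")
--
--     return flat_tokens
-- ===== SOURCE B (Python) =====
-- def distribute_parentheses(flat_tokens, parentheses_count):
--     # Every insertion position is at the front of the remaining payload, so the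
--     # result is just a prefix of ")" tokens: one per requested parenthesis, at
--     # most one per available gap (len + 1 gaps).
--     n = min(max(parentheses_count, 0), len(flat_tokens) + 1)
--     return [")"] * n + flat_tokens
-- ===== Notes on version B (the rewrite author's own statement) =====
-- stated objective: faster
-- what changed: Replaced the pop-and-insert loop (each list.insert is O(n)) by the closed form [")"]*min(max(count,0), len+1) + flat_tokens, after observing every insertion lands at the front.
-- intended difference: On an empty token list with parentheses_count >= 2, A returns [')',')'] because its position helper accidentally appends position 0 twice (start and end coincide); B returns [')'] , one parenthesis per actual gap, which is the intended capacity. — e.g. on distribute_parentheses([], 2): A returns [")", ")"], B returns [")"]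
import Mathlib
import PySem

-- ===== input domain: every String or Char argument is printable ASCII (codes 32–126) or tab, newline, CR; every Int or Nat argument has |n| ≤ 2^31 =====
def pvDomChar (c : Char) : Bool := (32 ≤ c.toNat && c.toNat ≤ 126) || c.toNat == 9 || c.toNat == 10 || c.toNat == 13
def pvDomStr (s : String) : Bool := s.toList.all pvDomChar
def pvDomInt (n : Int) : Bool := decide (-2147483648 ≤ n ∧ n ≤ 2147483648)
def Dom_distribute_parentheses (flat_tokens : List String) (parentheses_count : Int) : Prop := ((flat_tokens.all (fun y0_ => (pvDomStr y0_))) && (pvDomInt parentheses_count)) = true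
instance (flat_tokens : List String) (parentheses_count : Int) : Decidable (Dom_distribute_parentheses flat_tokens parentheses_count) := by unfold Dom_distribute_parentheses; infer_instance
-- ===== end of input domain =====

-- B replaces A's pop-and-insert loop by a closed-form ")"-prefix (faster; A also
-- mutates flat_tokens in place — the equivalence proved here is about the return value only).

-- ===== PORT A =====
-- helper: extract_valid_parenthesis_positions
def extract_valid_parenthesis_positions (flat_tokens : List String) : List Int :=
  ([(0 : Int)] ++ PySem.List.pyRange 1 (flat_tokens.length : Int) 1) ++ [(flat_tokens.length : Int)]

-- the 'for _ in range(parentheses_count)' loop with the 'if not valid_positions: break'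
def pvLoopA : Nat → List Int → List String → List String
  | 0, _, toks => toks
  | _ + 1, [], toks => toks
  | n + 1, p :: ps, toks => pvLoopA n ps (PySem.List.insert toks p ")")

def distribute_parentheses (flat_tokens : List String) (parentheses_count : Int) : List String :=
  pvLoopA parentheses_count.toNat (extract_valid_parenthesis_positions flat_tokens) flat_tokens

-- ===== PORT B =====
def distribute_parentheses_alt (flat_tokens : List String) (parentheses_count : Int) : List String :=
  List.replicate (min (max parentheses_count 0) ((flat_tokens.length : Int) + 1)).toNat ")"
    ++ flat_tokens

-- ===== PRECONDITION & SPEC =====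
-- On an empty token list with parentheses_count ≥ 2, A returns [")", ")"] because its
-- position helper accidentally appends position 0 twice (start and end coincide); B
-- returns [")"], one parenthesis per actual gap, which is the intended capacity.
def D_distribute_parentheses (flat_tokens : List String) (parentheses_count : Int) : Prop :=
  flat_tokens = [] ∧ 2 ≤ parentheses_count
instance (flat_tokens : List String) (parentheses_count : Int) : Decidable (D_distribute_parentheses flat_tokens parentheses_count) := by unfold D_distribute_parentheses; infer_instance

def Spec_distribute_parentheses (flat_tokens : List String) (parentheses_count : Int) (out : List String) : Prop := ¬ D_distribute_parentheses flat_tokens parentheses_count → out = distribute_parentheses_alt flat_tokens parentheses_count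
instance (flat_tokens : List String) (parentheses_count : Int) (out : List String) : Decidable (Spec_distribute_parentheses flat_tokens parentheses_count out) := by unfold Spec_distribute_parentheses; infer_instance

def pvDiffWitness_distribute_parentheses : List String × Int := ([], 2)
def pvDiffWitnessOut_distribute_parentheses : (List String) × (List String) := ([")", ")"], [")"])

-- ===== CLAIM (what is proved, stated in full; the proofs are below) =====
def Claim_unchanged_distribute_parentheses : Prop := ∀ (flat_tokens : List String) (parentheses_count : Int), Dom_distribute_parentheses flat_tokens parentheses_count → Spec_distribute_parentheses flat_tokens parentheses_count (distribute_parentheses flat_tokens parentheses_count)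
def Claim_changed_distribute_parentheses : Prop := Dom_distribute_parentheses (pvDiffWitness_distribute_parentheses.1) (pvDiffWitness_distribute_parentheses.2) ∧ D_distribute_parentheses (pvDiffWitness_distribute_parentheses.1) (pvDiffWitness_distribute_parentheses.2) ∧ distribute_parentheses (pvDiffWitness_distribute_parentheses.1) (pvDiffWitness_distribute_parentheses.2) = pvDiffWitnessOut_distribute_parentheses.1 ∧ distribute_parentheses_alt (pvDiffWitness_distribute_parentheses.1) (pvDiffWitness_distribute_parentheses.2) = pvDiffWitnessOut_distribute_parentheses.2 ∧ pvDiffWitnessOut_distribute_parentheses.1 ≠ pvDiffWitnessOut_distribute_parentheses.2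
def Claim_exact_distribute_parentheses : Prop := ∀ (flat_tokens : List String) (parentheses_count : Int), Dom_distribute_parentheses flat_tokens parentheses_count → D_distribute_parentheses flat_tokens parentheses_count → distribute_parentheses flat_tokens parentheses_count ≠ distribute_parentheses_alt flat_tokens parentheses_count

-- ===== LEMMAS AND PROOFS =====

-- inserting ")" at position k ≤ pre into a list with a ")"-prefix of length pre just grows the prefix
theorem insert_repl (k pre : Nat) (toks : List String) (h : k ≤ pre) :
    PySem.List.insert (List.replicate pre ")" ++ toks) (k : Int) ")"
      = List.replicate (pre + 1) ")" ++ toks := by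
  rw [PySem.List.insert_natCast _ _ _ (by simp; omega)]
  rw [List.take_append_of_le_length (by simpa using h),
      List.drop_append_of_le_length (by simpa using h)]
  rw [List.take_replicate, List.drop_replicate]
  have h1 : min k pre = k := by omega
  have h2 : k + (pre - k + 1) = pre + 1 := by omega
  rw [h1, ← h2, List.replicate_add]
  simp [List.replicate_succ]

-- running the loop on a range of positions starting at the current prefix length
theorem loop_range (n : Nat) : ∀ (pre : Nat) (b : Int) (toks : List String),
    pvLoopA n (PySem.List.pyRange (pre : Int) b 1) (List.replicate pre ")" ++ toks)
      = List.replicate (pre + min n (b - pre).toNat) ")" ++ toks := by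
  induction n with
  | zero => intro pre b toks; simp [pvLoopA]
  | succ n ih =>
    intro pre b toks
    by_cases hb : b ≤ (pre : Int)
    · rw [PySem.List.pyRange_one_eq_nil hb]
      have : (b - (pre : Int)).toNat = 0 := by omega
      simp [pvLoopA, this]
    · rw [not_le] at hb
      rw [PySem.List.pyRange_one_cons hb]
      show pvLoopA n _ (PySem.List.insert _ _ _) = _
      rw [insert_repl pre pre toks le_rfl]
      have hcast : ((pre : Int) + 1) = ((pre + 1 : Nat) : Int) := by push_cast; ring
      rw [hcast, ih (pre + 1) b toks]
      congr 1
      congr 1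
      omega

-- the positions list is the range [0, len+1) when the token list is nonempty
theorem positions_eq_range (flat_tokens : List String) (h : 1 ≤ flat_tokens.length) :
    extract_valid_parenthesis_positions flat_tokens
      = PySem.List.pyRange 0 ((flat_tokens.length : Int) + 1) 1 := by
  unfold extract_valid_parenthesis_positions
  have hL : (1 : Int) ≤ (flat_tokens.length : Int) := by exact_mod_cast h
  have h2 : PySem.List.pyRange 0 ((flat_tokens.length : Int) + 1) 1
      = PySem.List.pyRange 0 (flat_tokens.length : Int) 1 ++ [(flat_tokens.length : Int)] :=
    PySem.List.pyRange_one_succ_right (by omega)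
  have h3 : PySem.List.pyRange 0 (flat_tokens.length : Int) 1
      = 0 :: PySem.List.pyRange 1 (flat_tokens.length : Int) 1 := by
    simpa using PySem.List.pyRange_one_cons (a := 0) (b := (flat_tokens.length : Int)) (by omega)
  rw [h2, h3]
  simp

-- on an empty token list A's positions are [0, 0]; the loop's value for any fuel
theorem loopA_nil (c : Nat) :
    pvLoopA c [(0 : Int), (0 : Int)] [] = List.replicate (min c 2) ")" := by
  match c with
  | 0 => simp [pvLoopA]
  | 1 => simp [pvLoopA, PySem.List.insert_zero]
  | n + 2 =>
    show pvLoopA (n + 2) [(0:Int), (0:Int)] [] = _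
    simp only [pvLoopA, PySem.List.insert_zero]
    have : min (n + 2) 2 = 2 := by omega
    rw [this]
    match n with
    | 0 => simp [pvLoopA, List.replicate]
    | m + 1 => simp [pvLoopA, List.replicate]

-- ===== VERDICT (by name: the statements are the Claim_ definitions above) =====
theorem distribute_parentheses_spec : Claim_unchanged_distribute_parentheses := by
  intro flat_tokens c _ hD
  show distribute_parentheses flat_tokens c = distribute_parentheses_alt flat_tokens c
  unfold distribute_parentheses distribute_parentheses_alt
  match hft : flat_tokens with
  | [] =>
    have hc : c < 2 := by
      by_contra h
      exact hD ⟨rfl, by omega⟩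
    show pvLoopA c.toNat ([(0:Int)] ++ PySem.List.pyRange 1 0 1 ++ [(0:Int)]) [] = _
    rw [PySem.List.pyRange_one_eq_nil (by omega)]
    show pvLoopA c.toNat [(0:Int), (0:Int)] [] = _
    rw [loopA_nil]
    have : (min (max c 0) ((([] : List String).length : Int) + 1)).toNat = min c.toNat 2 := by
      simp; omega
    rw [this]
    simp
  | t :: ts =>
    have h1 : 1 ≤ (t :: ts).length := by simp
    rw [positions_eq_range _ h1]
    have := loop_range c.toNat 0 (((t :: ts).length : Int) + 1) (t :: ts)
    simp only [Nat.cast_zero, List.replicate_zero, List.nil_append, zero_add, sub_zero] at this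
    rw [this]
    congr 1
    congr 1
    omega

theorem distribute_parentheses_changed : Claim_changed_distribute_parentheses := by
  unfold Claim_changed_distribute_parentheses; decide

theorem distribute_parentheses_tight : Claim_exact_distribute_parentheses := by
  intro flat_tokens c _ ⟨hnil, hc⟩
  subst hnil
  unfold distribute_parentheses distribute_parentheses_alt
  show pvLoopA c.toNat ([(0:Int)] ++ PySem.List.pyRange 1 0 1 ++ [(0:Int)]) [] ≠ _
  rw [PySem.List.pyRange_one_eq_nil (by omega)]
  show pvLoopA c.toNat [(0:Int), (0:Int)] [] ≠ _
  rw [loopA_nil]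
  have h2 : min c.toNat 2 = 2 := by omega
  have h1 : (min (max c 0) ((([] : List String).length : Int) + 1)).toNat = 1 := by
    simp; omega
  rw [h1, h2]
  intro h
  have := congrArg List.length h
  simp at this
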